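-- pv_equiv track=rewrite | github.com/AhnHongchan/codetree-TILs | 240709/3개의 선 2/three-lines-2.py | can_cover_all_points_with_three_lines
-- ===== SOURCE A (Python) =====
-- from itertools import combinations
--
-- def can_cover_all_points_with_three_lines(points):
--     x_coords = set()
--     y_coords = set()
--
--     for x, y in points:
--         x_coords.add(x)
--         y_coords.add(y)
--
--     x_coords = list(x_coords)
--     y_coords = list(y_coords)
--
--     # 1. 세 개의 수직선으로 모든 점 커버 가능한지 확인
--     if len(x_coords) <= 3:
--         return 1
--
--     # 2. 세 개의 수평선으로 모든 점 커버 가능한지 확인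
--     if len(y_coords) <= 3:
--         return 1
--
--     # 3. 혼합된 경우 확인 (x선 1개 + y선 2개, x선 2개 + y선 1개)
--     for x_comb in combinations(x_coords, 1):
--         for y_comb in combinations(y_coords, 2):
--             covered = all(x in x_comb or y in y_comb for x, y in points)
--             if covered:
--                 return 1
--
--     for x_comb in combinations(x_coords, 2):
--         for y_comb in combinations(y_coords, 1):
--             covered = all(x in x_comb or y in y_comb for x, y in points)
--             if covered:
--                 return 1
--
--     return 0
-- ===== SOURCE B (Python) =====
-- def can_cover_all_points_with_three_lines(points):
--     # Recursive branching: each of the <=3 lines must pass through the first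
--     # still-uncovered point's row or column -> at most 2^3 recursive calls.
--     def solve(pts, k):
--         if not pts:
--             return True
--         if k == 0:
--             return False
--         x, y = pts[0]
--         return (solve([p for p in pts if p[0] != x], k - 1)
--                 or solve([p for p in pts if p[1] != y], k - 1))
--     return 1 if solve(points, 3) else 0
-- ===== Notes on version B (the rewrite author's own statement) =====
-- stated objective: faster
-- what changed: Replaces A's enumeration of all 1-vertical+2-horizontal and 2-vertical+1-horizontal line combinations (nested scans over all coordinate pairs) by a depth-3 recursion that branches on the first uncovered point, whose row or column some line must cover (at most 2^3 leaf checks over the point list).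
import Mathlib
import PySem

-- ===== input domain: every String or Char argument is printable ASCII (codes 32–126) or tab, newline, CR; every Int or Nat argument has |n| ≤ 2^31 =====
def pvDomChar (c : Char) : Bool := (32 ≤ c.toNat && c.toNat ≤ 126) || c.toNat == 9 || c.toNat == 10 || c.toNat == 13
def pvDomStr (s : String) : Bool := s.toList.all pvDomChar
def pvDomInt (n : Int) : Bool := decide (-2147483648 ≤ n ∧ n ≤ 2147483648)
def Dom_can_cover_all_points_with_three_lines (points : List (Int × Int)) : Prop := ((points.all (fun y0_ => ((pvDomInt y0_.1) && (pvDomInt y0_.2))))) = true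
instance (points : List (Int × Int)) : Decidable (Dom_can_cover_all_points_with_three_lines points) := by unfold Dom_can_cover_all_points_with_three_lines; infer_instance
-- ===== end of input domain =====

-- B replaces A's enumeration of all (1 vertical + 2 horizontal) / (2 vertical + 1 horizontal)
-- line combinations by a depth-3 recursive branching on the first uncovered point
-- (each line must cover that point's column or row), an asymptotically faster algorithm.

-- ===== PORT A =====
-- itertools.combinations of a list, in itertools order (elements at increasing indices).
def pvCombs : Nat → List Int → List (List Int)
  | 0, _ => [[]]
  | _ + 1, [] => []
  | k + 1, a :: rest => ((pvCombs k rest).map (fun c => a :: c)) ++ pvCombs (k + 1) rest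

-- Port of A. The Python consumes the two sets only through length tests and an
-- existence search (`any` over combinations, every hit returning the same 1), so the
-- unmodelled hash iteration order of list(set) cannot affect the result; we use
-- PySem.Set's insertion-order list.
def can_cover_all_points_with_three_lines (points : List (Int × Int)) : Int :=
  let sets := points.foldl
      (fun (s : PySem.Set Int × PySem.Set Int) p => (PySem.Set.add s.1 p.1, PySem.Set.add s.2 p.2))
      (PySem.Set.empty, PySem.Set.empty)
  let x_coords : List Int := sets.1
  let y_coords : List Int := sets.2
  if x_coords.length ≤ 3 then 1
  else if y_coords.length ≤ 3 then 1
  else if (pvCombs 1 x_coords).any (fun xc =>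
        (pvCombs 2 y_coords).any (fun yc =>
          points.all (fun p => xc.contains p.1 || yc.contains p.2))) then 1
  else if (pvCombs 2 x_coords).any (fun xc =>
        (pvCombs 1 y_coords).any (fun yc =>
          points.all (fun p => xc.contains p.1 || yc.contains p.2))) then 1
  else 0

-- ===== PORT B =====
-- solve(pts, k): can pts be covered with k more axis-parallel lines
-- (branch on the first remaining point's column / row).
def pvSolve : List (Int × Int) → Nat → Bool
  | [], _ => true
  | _ :: _, 0 => false
  | p :: rest, k + 1 =>
      pvSolve ((p :: rest).filter (fun q => q.1 != p.1)) k ||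
      pvSolve ((p :: rest).filter (fun q => q.2 != p.2)) k

def can_cover_all_points_with_three_lines_alt (points : List (Int × Int)) : Int :=
  if pvSolve points 3 then 1 else 0

-- ===== PRECONDITION & SPEC =====
def Spec_can_cover_all_points_with_three_lines (points : List (Int × Int)) (out : Int) : Prop := out = can_cover_all_points_with_three_lines_alt points
instance (points : List (Int × Int)) (out : Int) : Decidable (Spec_can_cover_all_points_with_three_lines points out) := by unfold Spec_can_cover_all_points_with_three_lines; infer_instance

-- ===== CLAIM (what is proved, stated in full; the proofs are below) =====
def Claim_equal_can_cover_all_points_with_three_lines : Prop := ∀ (points : List (Int × Int)), Dom_can_cover_all_points_with_three_lines points → Spec_can_cover_all_points_with_three_lines points (can_cover_all_points_with_three_lines points)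

-- ===== LEMMAS AND PROOFS =====

-- The mathematical meaning both programs decide: the points can be covered by a set V of
-- vertical lines and a set H of horizontal lines with |V| + |H| ≤ n.
def pvCover (n : Nat) (pts : List (Int × Int)) : Prop :=
  ∃ V H : Finset Int, V.card + H.card ≤ n ∧ ∀ p ∈ pts, p.1 ∈ V ∨ p.2 ∈ H

def pvX (points : List (Int × Int)) : List Int := PySem.Set.ofList (points.map Prod.fst)
def pvY (points : List (Int × Int)) : List Int := PySem.Set.ofList (points.map Prod.snd)

lemma pv_sets_fold (pts : List (Int × Int)) (s1 s2 : PySem.Set Int) :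
    pts.foldl (fun (s : PySem.Set Int × PySem.Set Int) p =>
        (PySem.Set.add s.1 p.1, PySem.Set.add s.2 p.2)) (s1, s2)
      = ((pts.map Prod.fst).foldl PySem.Set.add s1, (pts.map Prod.snd).foldl PySem.Set.add s2) := by
  induction pts generalizing s1 s2 with
  | nil => rfl
  | cons p rest ih => simp only [List.foldl_cons, List.map_cons]; exact ih _ _

lemma pvA_def (points : List (Int × Int)) :
    can_cover_all_points_with_three_lines points =
      (if (pvX points).length ≤ 3 then 1
       else if (pvY points).length ≤ 3 then 1
       else if (pvCombs 1 (pvX points)).any (fun xc =>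
             (pvCombs 2 (pvY points)).any (fun yc =>
               points.all (fun p => xc.contains p.1 || yc.contains p.2))) then 1
       else if (pvCombs 2 (pvX points)).any (fun xc =>
             (pvCombs 1 (pvY points)).any (fun yc =>
               points.all (fun p => xc.contains p.1 || yc.contains p.2))) then 1
       else 0) := by
  unfold can_cover_all_points_with_three_lines
  rw [pv_sets_fold]
  simp only [pvX, pvY, PySem.Set.ofList_eq_foldl, PySem.Set.empty]
  rfl

lemma pv_mem_X {points : List (Int × Int)} {p : Int × Int} (hp : p ∈ points) :
    p.1 ∈ pvX points := by
  simp only [pvX, PySem.Set.mem_ofList, List.mem_map]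
  exact ⟨p, hp, rfl⟩

lemma pv_mem_Y {points : List (Int × Int)} {p : Int × Int} (hp : p ∈ points) :
    p.2 ∈ pvY points := by
  simp only [pvY, PySem.Set.mem_ofList, List.mem_map]
  exact ⟨p, hp, rfl⟩

lemma pv_of_mem_X {points : List (Int × Int)} {a : Int} (ha : a ∈ pvX points) :
    ∃ p ∈ points, p.1 = a := by
  simpa only [pvX, PySem.Set.mem_ofList, List.mem_map] using ha

lemma pv_of_mem_Y {points : List (Int × Int)} {a : Int} (ha : a ∈ pvY points) :
    ∃ p ∈ points, p.2 = a := by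
  simpa only [pvY, PySem.Set.mem_ofList, List.mem_map] using ha

lemma pv_nodup_X (points : List (Int × Int)) : (pvX points).Nodup := PySem.Set.nodup_ofList _
lemma pv_nodup_Y (points : List (Int × Int)) : (pvY points).Nodup := PySem.Set.nodup_ofList _

lemma pv_mem_pvCombs (l : List Int) : ∀ (k : Nat) (c : List Int),
    c ∈ pvCombs k l ↔ c.Sublist l ∧ c.length = k := by
  induction l with
  | nil =>
    intro k c
    cases k with
    | zero =>
      simp only [pvCombs, List.mem_singleton, List.sublist_nil, List.length_eq_zero_iff]
      constructor
      · rintro rfl; exact ⟨rfl, rfl⟩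
      · rintro ⟨rfl, _⟩; rfl
    | succ k =>
      simp only [pvCombs, List.not_mem_nil, false_iff, not_and]
      rintro hs
      rw [List.sublist_nil] at hs
      subst hs
      simp
  | cons a rest ih =>
    intro k c
    cases k with
    | zero =>
      simp only [pvCombs, List.mem_singleton, List.length_eq_zero_iff]
      constructor
      · rintro rfl; exact ⟨List.nil_sublist _, rfl⟩
      · rintro ⟨_, rfl⟩; rfl
    | succ k =>
      simp only [pvCombs, List.mem_append, List.mem_map]
      constructor
      · rintro (⟨c', hc', rfl⟩ | h)
        · obtain ⟨hs, hl⟩ := (ih k c').mp hc'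
          exact ⟨hs.cons₂ a, by simp [hl]⟩
        · obtain ⟨hs, hl⟩ := (ih (k + 1) c).mp h
          exact ⟨hs.cons a, hl⟩
      · rintro ⟨hs, hl⟩
        cases hs with
        | cons _ h => exact Or.inr ((ih _ c).mpr ⟨h, hl⟩)
        | cons₂ _ h =>
          exact Or.inl ⟨_, (ih _ _).mpr ⟨h, by simpa using hl⟩, rfl⟩

lemma pv_pair_sublist {a b : Int} {l : List Int} (hab : a ≠ b) (ha : a ∈ l) (hb : b ∈ l) :
    [a, b].Sublist l ∨ [b, a].Sublist l := by
  induction l with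
  | nil => cases ha
  | cons c rest ih =>
    by_cases hca : c = a
    · subst hca
      have hb' : b ∈ rest := by
        rcases List.mem_cons.mp hb with h | h
        · exact absurd h.symm hab
        · exact h
      exact Or.inl ((List.singleton_sublist.mpr hb').cons₂ c)
    · by_cases hcb : c = b
      · subst hcb
        have ha' : a ∈ rest := by
          rcases List.mem_cons.mp ha with h | h
          · exact absurd h hab
          · exact h
        exact Or.inr ((List.singleton_sublist.mpr ha').cons₂ c)
      · have ha' : a ∈ rest := by
          rcases List.mem_cons.mp ha with h | h
          · exact absurd h.symm hca
          · exact h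
        have hb' : b ∈ rest := by
          rcases List.mem_cons.mp hb with h | h
          · exact absurd h.symm hcb
          · exact h
        rcases ih ha' hb' with h | h
        · exact Or.inl (h.cons c)
        · exact Or.inr (h.cons c)

-- a combination of size 2 containing two given distinct members of l
lemma pv_combs2_exists {y1 y2 : Int} {l : List Int} (hne : y1 ≠ y2)
    (h1 : y1 ∈ l) (h2 : y2 ∈ l) :
    ∃ c ∈ pvCombs 2 l, y1 ∈ c ∧ y2 ∈ c := by
  rcases pv_pair_sublist hne h1 h2 with h | h
  · exact ⟨[y1, y2], (pv_mem_pvCombs l 2 _).mpr ⟨h, rfl⟩, by simp, by simp⟩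
  · exact ⟨[y2, y1], (pv_mem_pvCombs l 2 _).mpr ⟨h, rfl⟩, by simp, by simp⟩

-- ===== correctness of B's recursion =====
lemma pvSolve_iff : ∀ (k : Nat) (pts : List (Int × Int)), pvSolve pts k = true ↔ pvCover k pts := by
  intro k
  induction k with
  | zero =>
    intro pts
    cases pts with
    | nil =>
      simp only [pvSolve, true_iff]
      exact ⟨∅, ∅, by simp, by simp⟩
    | cons p rest =>
      simp only [pvSolve, Bool.false_eq_true, false_iff]
      rintro ⟨V, H, hc, hcov⟩
      have hV : V = ∅ := Finset.card_eq_zero.mp (by omega)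
      have hH : H = ∅ := Finset.card_eq_zero.mp (by omega)
      rcases hcov p (List.mem_cons_self) with h | h
      · rw [hV] at h; exact absurd h (Finset.notMem_empty _)
      · rw [hH] at h; exact absurd h (Finset.notMem_empty _)
  | succ k ih =>
    intro pts
    cases pts with
    | nil =>
      simp only [pvSolve, true_iff]
      exact ⟨∅, ∅, by simp, by simp⟩
    | cons p rest =>
      simp only [pvSolve, Bool.or_eq_true]
      constructor
      · rintro (h | h)
        · obtain ⟨V, H, hc, hcov⟩ := (ih _).mp h
          refine ⟨insert p.1 V, H, ?_, ?_⟩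
          · have := Finset.card_insert_le p.1 V; omega
          · intro q hq
            by_cases hx : q.1 = p.1
            · exact Or.inl (hx ▸ Finset.mem_insert_self _ _)
            · have hq' : q ∈ (p :: rest).filter (fun r => r.1 != p.1) :=
                List.mem_filter.mpr ⟨hq, by simpa using hx⟩
              rcases hcov q hq' with h' | h'
              · exact Or.inl (Finset.mem_insert_of_mem h')
              · exact Or.inr h'
        · obtain ⟨V, H, hc, hcov⟩ := (ih _).mp h
          refine ⟨V, insert p.2 H, ?_, ?_⟩
          · have := Finset.card_insert_le p.2 H; omega
          · intro q hq
            by_cases hy : q.2 = p.2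
            · exact Or.inr (hy ▸ Finset.mem_insert_self _ _)
            · have hq' : q ∈ (p :: rest).filter (fun r => r.2 != p.2) :=
                List.mem_filter.mpr ⟨hq, by simpa using hy⟩
              rcases hcov q hq' with h' | h'
              · exact Or.inl h'
              · exact Or.inr (Finset.mem_insert_of_mem h')
      · rintro ⟨V, H, hc, hcov⟩
        rcases hcov p (List.mem_cons_self) with hx | hy
        · refine Or.inl ((ih _).mpr ⟨V.erase p.1, H, ?_, ?_⟩)
          · have h1 : 0 < V.card := Finset.card_pos.mpr ⟨p.1, hx⟩
            have h2 := Finset.card_erase_of_mem hx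
            omega
          · intro q hq
            obtain ⟨hq1, hq2⟩ := List.mem_filter.mp hq
            have hne : q.1 ≠ p.1 := by simpa using hq2
            rcases hcov q hq1 with h' | h'
            · exact Or.inl (Finset.mem_erase.mpr ⟨hne, h'⟩)
            · exact Or.inr h'
        · refine Or.inr ((ih _).mpr ⟨V, H.erase p.2, ?_, ?_⟩)
          · have h1 : 0 < H.card := Finset.card_pos.mpr ⟨p.2, hy⟩
            have h2 := Finset.card_erase_of_mem hy
            omega
          · intro q hq
            obtain ⟨hq1, hq2⟩ := List.mem_filter.mp hq
            have hne : q.2 ≠ p.2 := by simpa using hq2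
            rcases hcov q hq1 with h' | h'
            · exact Or.inl h'
            · exact Or.inr (Finset.mem_erase.mpr ⟨hne, h'⟩)

-- ===== correctness of A's branch enumeration =====

-- if all four branches of A fail, no cover with 3 lines exists
lemma pv_no_cover (points : List (Int × Int))
    (hX : ¬ (pvX points).length ≤ 3) (hY : ¬ (pvY points).length ≤ 3)
    (h3 : ¬ ((pvCombs 1 (pvX points)).any (fun xc =>
          (pvCombs 2 (pvY points)).any (fun yc =>
            points.all (fun p => xc.contains p.1 || yc.contains p.2)))) = true)
    (h4 : ¬ ((pvCombs 2 (pvX points)).any (fun xc =>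
          (pvCombs 1 (pvY points)).any (fun yc =>
            points.all (fun p => xc.contains p.1 || yc.contains p.2)))) = true) :
    ¬ pvCover 3 points := by
  rintro ⟨V, H, hcard, hcov⟩
  have hXcard : (pvX points).toFinset.card = (pvX points).length :=
    List.toFinset_card_of_nodup (pv_nodup_X points)
  have hYcard : (pvY points).toFinset.card = (pvY points).length :=
    List.toFinset_card_of_nodup (pv_nodup_Y points)
  -- restrict the cover to actually occurring coordinates
  set V' := V ∩ (pvX points).toFinset with hV'def
  set H' := H ∩ (pvY points).toFinset with hH'def
  have hcov' : ∀ p ∈ points, p.1 ∈ V' ∨ p.2 ∈ H' := by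
    intro p hp
    rcases hcov p hp with h | h
    · exact Or.inl (Finset.mem_inter.mpr ⟨h, List.mem_toFinset.mpr (pv_mem_X hp)⟩)
    · exact Or.inr (Finset.mem_inter.mpr ⟨h, List.mem_toFinset.mpr (pv_mem_Y hp)⟩)
  have hVsub : V' ⊆ (pvX points).toFinset := Finset.inter_subset_right
  have hHsub : H' ⊆ (pvY points).toFinset := Finset.inter_subset_right
  have hsum : V'.card + H'.card ≤ 3 := by
    have h1 : V'.card ≤ V.card := Finset.card_le_card Finset.inter_subset_left
    have h2 : H'.card ≤ H.card := Finset.card_le_card Finset.inter_subset_left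
    omega
  have hcases : V'.card = 0 ∨ V'.card = 1 ∨ V'.card = 2 ∨ V'.card = 3 := by omega
  rcases hcases with h0 | h1 | h2 | h3'
  · -- no vertical line used: all distinct y's lie in H', contradicting |Y| ≥ 4
    have hVempty : V' = ∅ := Finset.card_eq_zero.mp h0
    have hYsub : (pvY points).toFinset ⊆ H' := by
      intro y hy
      obtain ⟨p, hp, rfl⟩ := pv_of_mem_Y (List.mem_toFinset.mp hy)
      rcases hcov' p hp with h | h
      · rw [hVempty] at h; exact absurd h (Finset.notMem_empty _)
      · exact h
    have := Finset.card_le_card hYsub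
    omega
  · -- one vertical line x0 and at most two horizontal ones: branch 3 would have fired
    obtain ⟨x0, hx0⟩ := Finset.card_eq_one.mp h1
    have hx0X : x0 ∈ pvX points :=
      List.mem_toFinset.mp (hVsub (hx0 ▸ Finset.mem_singleton_self x0))
    obtain ⟨H'', hsub'', hsubY'', hcard''⟩ :=
      Finset.exists_subsuperset_card_eq hHsub (by omega) (by omega : 2 ≤ (pvY points).toFinset.card)
    obtain ⟨y1, y2, hne, hH''⟩ := Finset.card_eq_two.mp hcard''
    have hy1 : y1 ∈ pvY points :=
      List.mem_toFinset.mp (hsubY'' (hH'' ▸ Finset.mem_insert_self _ _))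
    have hy2 : y2 ∈ pvY points :=
      List.mem_toFinset.mp (hsubY'' (hH'' ▸ Finset.mem_insert_of_mem (Finset.mem_singleton_self _)))
    obtain ⟨c, hcmem, hy1c, hy2c⟩ := pv_combs2_exists hne hy1 hy2
    apply h3
    simp only [List.any_eq_true, List.all_eq_true]
    refine ⟨[x0], (pv_mem_pvCombs _ 1 _).mpr ⟨List.singleton_sublist.mpr hx0X, rfl⟩,
            c, hcmem, ?_⟩
    intro p hp
    rcases hcov' p hp with h | h
    · have : p.1 = x0 := by
        have := hx0 ▸ h; simpa using this
      simp [this]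
    · have hmem : p.2 ∈ H'' := hsub'' h
      rw [hH''] at hmem
      rcases Finset.mem_insert.mp hmem with h' | h'
      · simp [h' ▸ hy1c]
      · have : p.2 = y2 := Finset.mem_singleton.mp h'
        simp [this ▸ hy2c]
  · -- two vertical lines and at most one horizontal: branch 4 would have fired
    obtain ⟨x1, x2, hne, hV''⟩ := Finset.card_eq_two.mp h2
    have hx1 : x1 ∈ pvX points :=
      List.mem_toFinset.mp (hVsub (hV'' ▸ Finset.mem_insert_self _ _))
    have hx2 : x2 ∈ pvX points :=
      List.mem_toFinset.mp (hVsub (hV'' ▸ Finset.mem_insert_of_mem (Finset.mem_singleton_self _)))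
    obtain ⟨c, hcmem, hx1c, hx2c⟩ := pv_combs2_exists hne hx1 hx2
    obtain ⟨H'', hsub'', hsubY'', hcard''⟩ :=
      Finset.exists_subsuperset_card_eq hHsub (by omega) (by omega : 1 ≤ (pvY points).toFinset.card)
    obtain ⟨y0, hy0⟩ := Finset.card_eq_one.mp hcard''
    have hy0Y : y0 ∈ pvY points :=
      List.mem_toFinset.mp (hsubY'' (hy0 ▸ Finset.mem_singleton_self y0))
    apply h4
    simp only [List.any_eq_true, List.all_eq_true]
    refine ⟨c, hcmem, [y0], (pv_mem_pvCombs _ 1 _).mpr ⟨List.singleton_sublist.mpr hy0Y, rfl⟩, ?_⟩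
    intro p hp
    rcases hcov' p hp with h | h
    · have hmem : p.1 ∈ V' := h
      rw [hV''] at hmem
      rcases Finset.mem_insert.mp hmem with h' | h'
      · simp [h' ▸ hx1c]
      · have : p.1 = x2 := Finset.mem_singleton.mp h'
        simp [this ▸ hx2c]
    · have : p.2 ∈ H'' := hsub'' h
      have : p.2 = y0 := by rw [hy0] at this; simpa using this
      simp [this]
  · -- three vertical lines, no horizontal: all distinct x's lie in V', contradicting |X| ≥ 4
    have hH0 : H' = ∅ := Finset.card_eq_zero.mp (by omega)
    have hXsub : (pvX points).toFinset ⊆ V' := by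
      intro x hx
      obtain ⟨p, hp, rfl⟩ := pv_of_mem_X (List.mem_toFinset.mp hx)
      rcases hcov' p hp with h | h
      · exact h
      · rw [hH0] at h; exact absurd h (Finset.notMem_empty _)
    have := Finset.card_le_card hXsub
    omega

lemma pvA_iff (points : List (Int × Int)) :
    can_cover_all_points_with_three_lines points = 1 ↔ pvCover 3 points := by
  rw [pvA_def]
  split_ifs with h1 h2 h3 h4
  · refine iff_of_true rfl ⟨(pvX points).toFinset, ∅, ?_, ?_⟩
    · simp only [Finset.card_empty]
      have := List.toFinset_card_le (pvX points); omega
    · exact fun p hp => Or.inl (List.mem_toFinset.mpr (pv_mem_X hp))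
  · refine iff_of_true rfl ⟨∅, (pvY points).toFinset, ?_, ?_⟩
    · simp only [Finset.card_empty]
      have := List.toFinset_card_le (pvY points); omega
    · exact fun p hp => Or.inr (List.mem_toFinset.mpr (pv_mem_Y hp))
  · simp only [List.any_eq_true, List.all_eq_true] at h3
    obtain ⟨xc, hxc, yc, hyc, hall⟩ := h3
    refine iff_of_true rfl ⟨xc.toFinset, yc.toFinset, ?_, ?_⟩
    · have hx := ((pv_mem_pvCombs _ 1 xc).mp hxc).2
      have hy := ((pv_mem_pvCombs _ 2 yc).mp hyc).2
      have c1 := List.toFinset_card_le xc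
      have c2 := List.toFinset_card_le yc
      omega
    · intro p hp
      have := hall p hp
      rcases Bool.or_eq_true_iff.mp this with h | h
      · exact Or.inl (List.mem_toFinset.mpr (List.contains_iff_mem.mp h))
      · exact Or.inr (List.mem_toFinset.mpr (List.contains_iff_mem.mp h))
  · simp only [List.any_eq_true, List.all_eq_true] at h4
    obtain ⟨xc, hxc, yc, hyc, hall⟩ := h4
    refine iff_of_true rfl ⟨xc.toFinset, yc.toFinset, ?_, ?_⟩
    · have hx := ((pv_mem_pvCombs _ 2 xc).mp hxc).2
      have hy := ((pv_mem_pvCombs _ 1 yc).mp hyc).2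
      have c1 := List.toFinset_card_le xc
      have c2 := List.toFinset_card_le yc
      omega
    · intro p hp
      have := hall p hp
      rcases Bool.or_eq_true_iff.mp this with h | h
      · exact Or.inl (List.mem_toFinset.mpr (List.contains_iff_mem.mp h))
      · exact Or.inr (List.mem_toFinset.mpr (List.contains_iff_mem.mp h))
  · exact iff_of_false (by omega) (pv_no_cover points h1 h2 h3 h4)

lemma pvA_zero_or_one (points : List (Int × Int)) :
    can_cover_all_points_with_three_lines points = 0 ∨
    can_cover_all_points_with_three_lines points = 1 := by
  rw [pvA_def]
  split_ifs <;> simp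

-- ===== VERDICT (by name: the statement is the Claim_ definition above) =====
theorem can_cover_all_points_with_three_lines_spec : Claim_equal_can_cover_all_points_with_three_lines := by
  intro points _
  show can_cover_all_points_with_three_lines points = can_cover_all_points_with_three_lines_alt points
  unfold can_cover_all_points_with_three_lines_alt
  by_cases h : pvSolve points 3 = true
  · rw [if_pos h]
    exact (pvA_iff points).mpr ((pvSolve_iff 3 points).mp h)
  · rw [if_neg h]
    rcases pvA_zero_or_one points with h0 | h1
    · exact h0
    · exact absurd ((pvSolve_iff 3 points).mpr ((pvA_iff points).mp h1)) h
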